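-- pv_equiv track=rewrite | github.com/messyoxd/PO | Shell/Shell.py | adapted_insertion_sort
-- ===== SOURCE A (Python) =====
-- def adapted_insertion_sort(sortable_list, size, h) -> list:
--     for i in range(h, size):
--         pivo = sortable_list[i]
--         j = i - h
--         while j >= 0 and sortable_list[j] > pivo:
--             sortable_list[j+h] = sortable_list[j]
--             j -= h
--         sortable_list[j+h] = pivo
--     return sortable_list
-- ===== SOURCE B (Python) =====
-- def adapted_insertion_sort(sortable_list, size, h) -> list:
--     # Sort each gap-h strided subsequence independently and write it back.
--     n = min(size, len(sortable_list))
--     for r in range(min(h, n)):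
--         idxs = []
--         i = r
--         while i < n:
--             idxs.append(i)
--             i += h
--         vals = sorted(sortable_list[i] for i in idxs)
--         for i, v in zip(idxs, vals):
--             sortable_list[i] = v
--     return sortable_list
-- ===== Notes on version B (the rewrite author's own statement) =====
-- stated objective: alternative
-- what changed: Instead of A's interleaved gap-h insertion pass (shift-and-insert per element), B decomposes the list into the h strided subsequences, sorts each one with Python's built-in sort, and writes the sorted values back to the same strided positions.
-- outside the precondition, e.g. on adapted_insertion_sort([1, 2, 1], 1, -1): A returns [2, 1, 1], B returns [1, 2, 1]; on adapted_insertion_sort([2, 1, 1], 0, -1): A returns [1, 1, 2], B returns [2, 1, 1]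
import Mathlib
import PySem

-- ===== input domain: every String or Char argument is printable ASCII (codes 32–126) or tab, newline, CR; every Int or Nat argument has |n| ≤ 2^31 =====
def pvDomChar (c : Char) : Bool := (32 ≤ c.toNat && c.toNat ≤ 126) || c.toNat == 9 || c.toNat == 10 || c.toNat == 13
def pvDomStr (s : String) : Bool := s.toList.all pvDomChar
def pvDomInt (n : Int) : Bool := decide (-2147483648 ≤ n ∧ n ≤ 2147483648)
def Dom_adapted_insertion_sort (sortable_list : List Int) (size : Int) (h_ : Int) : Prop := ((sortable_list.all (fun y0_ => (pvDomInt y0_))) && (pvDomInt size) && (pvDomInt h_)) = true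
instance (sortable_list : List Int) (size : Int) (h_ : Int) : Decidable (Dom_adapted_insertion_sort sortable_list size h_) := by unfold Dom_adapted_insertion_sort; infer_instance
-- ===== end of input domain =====

-- B replaces A's interleaved gap-h insertion pass by sorting each of the h strided
-- subsequences independently and writing the values back (alternative decomposition;
-- both Pythons mutate the list in place the same way, the theorems are about the return value).


-- ===== PORT A =====
-- the inner while loop of A: state (sortable_list, j); fuel only makes it total
-- (on Pre_ inputs i+1 fuel steps always suffice, the guard stops the loop first)
def pvWhileA : Nat → List Int → Int → Int → Int → (List Int × Int)
  | 0, l, _, j, _ => (l, j)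
  | fuel+1, l, pivo, j, h_ =>
    if 0 ≤ j ∧ pivo < PySem.List.pyGetD l j 0 then
      pvWhileA fuel (PySem.List.pySetD l (j + h_) (PySem.List.pyGetD l j 0)) pivo (j - h_) h_
    else (l, j)

def adapted_insertion_sort (sortable_list : List Int) (size : Int) (h_ : Int) : List Int :=
  (PySem.List.pyRange h_ size 1).foldl
    (fun cur i =>
      let pivo := PySem.List.pyGetD cur i 0
      let res := pvWhileA (i.toNat + 1) cur pivo (i - h_) h_
      PySem.List.pySetD res.1 (res.2 + h_) pivo)
    sortable_list

-- ===== PORT B =====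
-- the index-collecting while loop of B (fuel only makes it total; n+1 steps suffice)
def pvCollect : Nat → Int → Int → Int → List Int
  | 0, _, _, _ => []
  | fuel+1, i, n, h_ => if i < n then i :: pvCollect fuel (i + h_) n h_ else []

def adapted_insertion_sort_alt (sortable_list : List Int) (size : Int) (h_ : Int) : List Int :=
  let n := min size (sortable_list.length : Int)
  (PySem.List.pyRange 0 (min h_ n) 1).foldl
    (fun cur r =>
      let idxs := pvCollect (n.toNat + 1) r n h_
      let vals := PySem.List.sorted (idxs.map (fun i => PySem.List.pyGetD cur i 0)) (fun x => x) false
      (idxs.zip vals).foldl (fun c iv => PySem.List.pySetD c iv.1 iv.2) cur)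
    sortable_list

-- ===== PRECONDITION & SPEC =====
-- Pre_ excludes negative gaps h (Python then indexes from the end of the list, an
-- accident of negative-index wraparound on inputs no shell sort produces) and
-- size > len(list) with h < size (A raises IndexError there).
def Pre_adapted_insertion_sort (sortable_list : List Int) (size : Int) (h_ : Int) : Prop :=
  0 ≤ h_ ∧ (h_ < size → size ≤ (sortable_list.length : Int))
instance (sortable_list : List Int) (size : Int) (h_ : Int) : Decidable (Pre_adapted_insertion_sort sortable_list size h_) := by unfold Pre_adapted_insertion_sort; infer_instance
def pvWitness_adapted_insertion_sort : List Int × Int × Int := ([3, 1, 2, 5, 4], 5, 2)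

def Spec_adapted_insertion_sort (sortable_list : List Int) (size : Int) (h_ : Int) (out : List Int) : Prop := out = adapted_insertion_sort_alt sortable_list size h_
instance (sortable_list : List Int) (size : Int) (h_ : Int) (out : List Int) : Decidable (Spec_adapted_insertion_sort sortable_list size h_ out) := by unfold Spec_adapted_insertion_sort; infer_instance

-- ===== CLAIM (what is proved, stated in full; the proofs are below) =====
def Claim_equal_adapted_insertion_sort : Prop := ∀ (sortable_list : List Int) (size : Int) (h_ : Int), Dom_adapted_insertion_sort sortable_list size h_ → Pre_adapted_insertion_sort sortable_list size h_ → Spec_adapted_insertion_sort sortable_list size h_ (adapted_insertion_sort sortable_list size h_)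

-- ===== LEMMAS AND PROOFS =====

-- number of strided positions r, r+h, … strictly below n
def cnt (n h r : Nat) : Nat :=
  if h0 : 0 < h ∧ r < n then cnt n h (r + h) + 1 else 0
termination_by n - r
decreasing_by omega

-- the values of list l at the strided positions of class r below bound n
def cls (l : List Int) (n h r : Nat) : List Int :=
  (List.range (cnt n h r)).map (fun u => l.getD (r + u * h) 0)

lemma cnt_stop {n h r : Nat} (hn : n ≤ r) : cnt n h r = 0 := by
  rw [cnt]; simp; omega

lemma cnt_formula {h r k s : Nat} (h0 : 0 < h) (hs : s < h) :
    cnt (r + (k * h + s)) h r = if s = 0 then k else k + 1 := by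
  induction k generalizing r with
  | zero =>
    by_cases hz : s = 0
    · simp [hz, cnt_stop]
    · rw [cnt]
      have h1 : 0 < h ∧ r < r + (0 * h + s) := ⟨h0, by omega⟩
      rw [dif_pos h1, cnt_stop (by omega)]
      simp [hz]
  | succ k ih =>
    rw [cnt]
    have h1 : 0 < h ∧ r < r + ((k + 1) * h + s) := ⟨h0, by nlinarith⟩
    rw [dif_pos h1]
    have h2 : r + ((k + 1) * h + s) = (r + h) + (k * h + s) := by ring
    rw [h2, ih]
    split <;> rfl

-- decompose n - r into k*h + s with s < h, to use cnt_formula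
lemma cnt_decomp {h r n : Nat} (h0 : 0 < h) (hrn : r ≤ n) :
    ∃ k s, s < h ∧ n = r + (k * h + s) := by
  refine ⟨(n - r) / h, (n - r) % h, Nat.mod_lt _ h0, ?_⟩
  have h1 := Nat.div_add_mod (n - r) h
  have h2 : (n - r) / h * h = h * ((n - r) / h) := Nat.mul_comm _ _
  omega

lemma cnt_le {n h r : Nat} (h0 : 0 < h) : cnt n h r ≤ n := by
  by_cases hrn : r ≤ n
  · obtain ⟨k, s, hs, hn⟩ := cnt_decomp h0 hrn
    subst hn; rw [cnt_formula h0 hs]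
    have hk : k ≤ k * h := Nat.le_mul_of_pos_right k h0
    split <;> omega
  · rw [cnt_stop (by omega)]; omega

-- positions counted by cnt lie below the bound, and conversely
lemma cnt_lt {n h r u : Nat} (h0 : 0 < h) (hu : u < cnt n h r) : r + u * h < n := by
  by_cases hrn : r ≤ n
  · obtain ⟨k, s, hs, hn⟩ := cnt_decomp h0 hrn
    subst hn; rw [cnt_formula h0 hs] at hu
    split at hu
    · have h1 := Nat.mul_le_mul_right h (show u + 1 ≤ k by omega)
      have h2 : (u + 1) * h = u * h + h := by ring
      omega
    · have h1 := Nat.mul_le_mul_right h (show u ≤ k by omega)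
      omega
  · rw [cnt_stop (by omega)] at hu; omega

lemma cnt_gt {n h r u : Nat} (h0 : 0 < h) (hu : r + u * h < n) : u < cnt n h r := by
  have hrn : r ≤ n := by omega
  obtain ⟨k, s, hs, hn⟩ := cnt_decomp h0 hrn
  subst hn; rw [cnt_formula h0 hs]
  have h2 : (k + 1) * h = k * h + h := by ring
  split
  · have h3 : u * h < k * h := by omega
    exact Nat.lt_of_mul_lt_mul_right h3
  · have h3 : u * h < (k + 1) * h := by omega
    exact Nat.lt_of_mul_lt_mul_right h3


lemma stride_ne {H u w r : Nat} (h0 : 0 < H) (huw : u ≠ w) : r + u * H ≠ r + w * H := by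
  intro hEq
  exact huw (Nat.eq_of_mul_eq_mul_right h0 (by omega))

lemma set_getD_ne {l : List Int} {a q : Nat} {v : Int} (h : a ≠ q) :
    (l.set a v).getD q 0 = l.getD q 0 := by
  simp [List.getD_eq_getElem?_getD, List.getElem?_set_ne h]

lemma set_getD_self {l : List Int} {a : Nat} {v : Int} (h : a < l.length) :
    (l.set a v).getD a 0 = v := by
  simp [List.getD_eq_getElem?_getD, h]

-- full characterisation of A's inner while loop, entered at j = r + t*H - H
lemma whileA_spec {H r : Nat} (h0 : 0 < H) (hr : r < H) :
    ∀ (t : Nat) (fuel : Nat) (l : List Int) (p : Int), t ≤ fuel → r + t * H < l.length →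
    ∃ m l', m ≤ t ∧
      pvWhileA fuel l p ((r : Int) + t * H - H) H = (l', (r : Int) + m * H - H) ∧
      l'.length = l.length ∧
      (∀ q : Nat, (∀ u : Nat, m + 1 ≤ u → u ≤ t → q ≠ r + u * H) → l'.getD q 0 = l.getD q 0) ∧
      (∀ u : Nat, m + 1 ≤ u → u ≤ t → l'.getD (r + u * H) 0 = l.getD (r + (u - 1) * H) 0) ∧
      (∀ u : Nat, m ≤ u → u < t → p < l.getD (r + u * H) 0) ∧
      (m = 0 ∨ l.getD (r + (m - 1) * H) 0 ≤ p) := by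
  intro t
  induction t with
  | zero =>
    intro fuel l p _ _
    refine ⟨0, l, le_refl 0, ?_, rfl, fun q _ => rfl, fun u hu1 hu2 => by omega,
      fun u _ hu => by omega, Or.inl rfl⟩
    cases fuel with
    | zero => rfl
    | succ f =>
      rw [pvWhileA, if_neg (by intro h; obtain ⟨hc, -⟩ := h; push_cast at hc; omega)]
  | succ t ih =>
    intro fuel l p hfuel hlen
    obtain ⟨f, rfl⟩ : ∃ f, fuel = f + 1 := ⟨fuel - 1, by omega⟩
    have hargs : (r : Int) + (t + 1 : Nat) * H - H = ((r + t * H : Nat) : Int) := by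
      push_cast; ring
    have hv : PySem.List.pyGetD l ((r : Int) + (t + 1 : Nat) * H - H) 0 = l.getD (r + t * H) 0 := by
      rw [hargs, PySem.List.pyGetD_natCast]
    rw [pvWhileA]
    by_cases hg : p < l.getD (r + t * H) 0
    · have hcond : 0 ≤ (r : Int) + (t + 1 : Nat) * H - H ∧
          p < PySem.List.pyGetD l ((r : Int) + (t + 1 : Nat) * H - H) 0 := by
        refine ⟨by push_cast; nlinarith, by rw [hv]; exact hg⟩
      rw [if_pos hcond, hv]
      have hset : PySem.List.pySetD l ((r : Int) + (t + 1 : Nat) * H - H + H) (l.getD (r + t * H) 0)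
          = l.set (r + (t + 1) * H) (l.getD (r + t * H) 0) := by
        have harg2 : (r : Int) + (t + 1 : Nat) * H - H + H = ((r + (t + 1) * H : Nat) : Int) := by
          push_cast; ring
        rw [harg2, PySem.List.pySetD_natCast]
      rw [hset]
      have harg3 : (r : Int) + (t + 1 : Nat) * H - H - H = (r : Int) + (t : Nat) * H - H := by
        push_cast; ring
      rw [harg3]
      set l2 := l.set (r + (t + 1) * H) (l.getD (r + t * H) 0) with hl2
      have hlen2 : r + t * H < l2.length := by
        have h1 : (t : Nat) * H ≤ (t+1) * H := by nlinarith
        simp [hl2]; omega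
      obtain ⟨m, l', hm, heq, hlen', huntouched, hshift, hguard, hstop⟩ :=
        ih f l2 p (by omega) hlen2
      have htop : r + (t + 1) * H < l.length := hlen
      refine ⟨m, l', by omega, heq, by simp [hlen', hl2], ?_, ?_, ?_, ?_⟩
      · -- untouched
        intro q hq
        have h1 : l'.getD q 0 = l2.getD q 0 :=
          huntouched q (fun u hu1 hu2 => hq u hu1 (by omega))
        have h2 : q ≠ r + (t + 1) * H := hq (t + 1) (by omega) (le_refl _)
        rw [h1, hl2, set_getD_ne (Ne.symm h2)]
      · -- shifted
        intro u hu1 hu2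
        by_cases hu3 : u ≤ t
        · rw [hshift u hu1 hu3, hl2,
            set_getD_ne (stride_ne h0 (show (t+1) ≠ (u-1) by omega))]
        · have hu4 : u = t + 1 := by omega
          subst hu4
          have h1 : l'.getD (r + (t + 1) * H) 0 = l2.getD (r + (t + 1) * H) 0 :=
            huntouched _ (fun u' hu1' hu2' => (stride_ne h0 (show (t+1) ≠ u' by omega)))
          rw [h1, hl2, set_getD_self htop]
          congr 1
      · -- guard
        intro u hu1 hu2
        by_cases hu3 : u < t
        · have h1 := hguard u hu1 hu3
          rwa [hl2, set_getD_ne (stride_ne h0 (show (t+1) ≠ u by omega))] at h1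
        · have hu4 : u = t := by omega
          subst hu4; exact hg
      · -- stop
        rcases hstop with h1 | h1
        · exact Or.inl h1
        · right
          rwa [hl2, set_getD_ne (stride_ne h0 (show (t+1) ≠ m - 1 by omega))] at h1
    · have hcond : ¬ (0 ≤ (r : Int) + (t + 1 : Nat) * H - H ∧
          p < PySem.List.pyGetD l ((r : Int) + (t + 1 : Nat) * H - H) 0) := by
        intro ⟨_, hc⟩; rw [hv] at hc; exact hg hc
      rw [if_neg hcond]
      refine ⟨t + 1, l, le_refl _, rfl, rfl, fun q _ => rfl,
        fun u hu1 hu2 => by omega, fun u hu1 hu2 => by omega, Or.inr ?_⟩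
      simpa using not_lt.mp hg


-- the body of A's outer for-loop, as a named function (definitionally the port's lambda)
def aStep (h_ : Int) (cur : List Int) (i : Int) : List Int :=
  let pivo := PySem.List.pyGetD cur i 0
  let res := pvWhileA (i.toNat + 1) cur pivo (i - h_) h_
  PySem.List.pySetD res.1 (res.2 + h_) pivo

lemma portA_eq_fold (l : List Int) (size h_ : Int) :
    adapted_insertion_sort l size h_ = (PySem.List.pyRange h_ size 1).foldl (aStep h_) l := rfl

lemma stride_mod {H r u : Nat} (h0 : 0 < H) (hr : r < H) : (r + u * H) % H = r := by
  rw [Nat.add_mul_mod_self_right, Nat.mod_eq_of_lt hr]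

lemma stride_mono {H r : Nat} {u w : Nat} (huw : u ≤ w) : r + u * H ≤ r + w * H := by
  have := Nat.mul_le_mul_right H huw; omega

lemma aStep_eq (cur : List Int) (i H : Nat) :
    aStep (H : Int) cur ((i : Nat) : Int) =
      PySem.List.pySetD (pvWhileA (i + 1) cur (cur.getD i 0) ((i : Int) - H) H).1
        ((pvWhileA (i + 1) cur (cur.getD i 0) ((i : Int) - H) H).2 + H) (cur.getD i 0) := by
  unfold aStep
  simp

-- one outer iteration of A at index i = r + k*H: the class-r prefix list gains the
-- pivot (sortedly), everything off-class or beyond i is untouched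
lemma stepA_spec {H r k : Nat} {cur : List Int} (h0 : 0 < H) (hr : r < H) (hk : 1 ≤ k)
    (hlen : r + k * H < cur.length)
    (hsorted : ((List.range k).map (fun u => cur.getD (r + u * H) 0)).Pairwise (· ≤ ·)) :
    ∃ l2, aStep (H : Int) cur ((r + k * H : Nat) : Int) = l2 ∧ l2.length = cur.length ∧
      (∀ q : Nat, q < cur.length → (q % H ≠ r ∨ r + k * H < q) → l2.getD q 0 = cur.getD q 0) ∧
      ((List.range (k + 1)).map (fun u => l2.getD (r + u * H) 0)).Pairwise (· ≤ ·) ∧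
      ((List.range (k + 1)).map (fun u => l2.getD (r + u * H) 0)).Perm
        (cur.getD (r + k * H) 0 :: (List.range k).map (fun u => cur.getD (r + u * H) 0)) := by
  obtain ⟨m, l', hm, heq, hlen', huntouched, hshift, hguard, hstop⟩ :=
    whileA_spec h0 hr k ((r + k * H) + 1) cur (cur.getD (r + k * H) 0) (by have := Nat.le_mul_of_pos_right k h0; omega) hlen
  set pivo := cur.getD (r + k * H) 0 with hpivo
  set g := (List.range k).map (fun u => cur.getD (r + u * H) 0) with hg
  have hstep : aStep (H : Int) cur ((r + k * H : Nat) : Int) = l'.set (r + m * H) pivo := by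
    rw [aStep_eq]
    have harg : ((r + k * H : Nat) : Int) - (H : Int) = (r : Int) + k * H - H := by push_cast; ring
    rw [harg, heq]
    have harg2 : (r : Int) + m * H - H + H = ((r + m * H : Nat) : Int) := by push_cast; ring
    rw [harg2, PySem.List.pySetD_natCast]
  set l2 := l'.set (r + m * H) pivo with hl2
  -- pointwise values of the new class-r list
  have hval_lt : ∀ u : Nat, u < m → l2.getD (r + u * H) 0 = cur.getD (r + u * H) 0 := by
    intro u hu
    rw [hl2, set_getD_ne (stride_ne h0 (show m ≠ u by omega)),
      huntouched _ (fun w hw1 hw2 => stride_ne h0 (show u ≠ w by omega))]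
  have hval_eq : l2.getD (r + m * H) 0 = pivo := by
    rw [hl2, set_getD_self]
    rw [hlen']
    calc r + m * H ≤ r + k * H := stride_mono hm
    _ < cur.length := hlen
  have hval_gt : ∀ u : Nat, m < u → u ≤ k → l2.getD (r + u * H) 0 = cur.getD (r + (u - 1) * H) 0 := by
    intro u hu1 hu2
    rw [hl2, set_getD_ne (stride_ne h0 (show m ≠ u by omega)), hshift u (by omega) hu2]
  -- the new class list is the old one with the pivot inserted at position m
  have hlg : g.length = k := by simp [hg]
  have hgj : ∀ j : Nat, j < k → g[j]? = some (cur.getD (r + j * H) 0) := by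
    intro j hj
    simp [hg, List.getElem?_map, List.getElem?_range, hj]
  have hng : (List.range (k + 1)).map (fun u => l2.getD (r + u * H) 0)
      = g.take m ++ pivo :: g.drop m := by
    apply List.ext_getElem?
    intro j
    have hmk : m ≤ g.length := by omega
    by_cases hjk : j < k + 1
    · have hLHS : ((List.range (k + 1)).map (fun u => l2.getD (r + u * H) 0))[j]?
          = some (l2.getD (r + j * H) 0) := by
        simp [List.getElem?_map, List.getElem?_range, hjk]
      rw [hLHS]
      rcases lt_trichotomy j m with hj | hj | hj
      · rw [List.getElem?_append_left (by simp [min_eq_left hmk]; omega),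
          List.getElem?_take_of_lt hj, hgj j (by omega), hval_lt j hj]
      · subst hj
        rw [List.getElem?_append_right (by simp [min_eq_left hmk])]
        simp only [List.length_take, min_eq_left hmk, Nat.sub_self, List.getElem?_cons_zero]
        rw [hval_eq]
      · rw [List.getElem?_append_right (by simp [min_eq_left hmk]; omega)]
        have h1 : j - (g.take m).length = (j - m - 1) + 1 := by
          simp [min_eq_left hmk]; omega
        rw [h1, List.getElem?_cons_succ, List.getElem?_drop]
        have h2 : m + (j - m - 1) = j - 1 := by omega
        rw [h2, hgj (j - 1) (by omega), hval_gt j hj (by omega)]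
    · have h1 : ((List.range (k + 1)).map (fun u => l2.getD (r + u * H) 0))[j]? = none := by
        apply List.getElem?_eq_none
        simp; omega
      have h2 : (g.take m ++ pivo :: g.drop m)[j]? = none := by
        apply List.getElem?_eq_none
        simp [min_eq_left hmk]; omega
      rw [h1, h2]
  refine ⟨l2, hstep, by simp [hl2, hlen'], ?_, ?_, ?_⟩
  · -- untouched
    intro q hq hcase
    have hne : ∀ w : Nat, w ≤ k → q ≠ r + w * H := by
      intro w hw hqe
      rcases hcase with hc | hc
      · exact hc (hqe ▸ stride_mod h0 hr)
      · have := stride_mono (H := H) (r := r) hw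
        omega
    rw [hl2, set_getD_ne (fun hx => hne m hm hx.symm),
      huntouched _ (fun w hw1 hw2 => hne w hw2)]
  · -- sortedness
    rw [hng]
    have hgel : ∀ i j : Nat, (hij : i ≤ j) → (hj : j < g.length) → g[i]'(by omega) ≤ g[j] := by
      intro i j hij hj
      rcases Nat.eq_or_lt_of_le hij with h | h
      · subst h; exact le_refl _
      · exact List.pairwise_iff_getElem.mp hsorted i j _ _ h
    have hglen : g.length = k := by simp [hg]
    have hguard' : ∀ j : Nat, m ≤ j → (hj : j < g.length) → pivo ≤ g[j] := by
      intro j hjm hj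
      have := hguard j hjm (by omega)
      have hgj : g[j] = cur.getD (r + j * H) 0 := by simp [hg]
      rw [hgj]; exact le_of_lt this
    have hstop' : ∀ j : Nat, j < m → (hj : j < g.length) → g[j] ≤ pivo := by
      intro j hjm hj
      rcases hstop with h | h
      · omega
      · have h1 : g[j] ≤ g[m-1]'(by omega) := hgel j (m-1) (by omega) (by omega)
        have h2 : g[m-1]'(by omega) = cur.getD (r + (m-1) * H) 0 := by simp [hg]
        rw [h2] at h1
        exact le_trans h1 h
    rw [List.pairwise_append]
    refine ⟨List.Pairwise.sublist (List.take_sublist m g) hsorted, ?_, ?_⟩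
    · rw [List.pairwise_cons]
      refine ⟨?_, List.Pairwise.sublist (List.drop_sublist m g) hsorted⟩
      intro b hb
      obtain ⟨j, hj, hbj⟩ := List.getElem_of_mem hb
      rw [List.getElem_drop] at hbj
      exact hbj ▸ hguard' (m + j) (by omega) (by simp at hj; omega)
    · intro a ha b hb
      obtain ⟨j, hj, haj⟩ := List.getElem_of_mem ha
      rw [List.getElem_take] at haj
      have hjm : j < m := by simp at hj; omega
      have ha' : a ≤ pivo := haj ▸ hstop' j hjm (by simp at hj; omega)
      rcases List.mem_cons.mp hb with hb1 | hb1
      · exact hb1 ▸ ha'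
      · obtain ⟨j', hj', hbj⟩ := List.getElem_of_mem hb1
        rw [List.getElem_drop] at hbj
        exact le_trans ha' (hbj ▸ hguard' (m + j') (by omega) (by simp at hj'; omega))
  · -- permutation
    rw [hng]
    have h1 : (g.take m ++ pivo :: g.drop m).Perm (pivo :: (g.take m ++ g.drop m)) :=
      List.perm_middle
    rwa [List.take_append_drop] at h1


lemma cnt_rk {H r k : Nat} (h0 : 0 < H) : cnt (r + k * H) H r = k := by
  have h1 := cnt_formula (r := r) (k := k) (s := 0) h0 h0
  simpa using h1

lemma cnt_rk1 {H r k : Nat} (h0 : 0 < H) : cnt (r + k * H + 1) H r = k + 1 := by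
  rcases Nat.lt_or_ge 1 H with hH | hH
  · have h1 := cnt_formula (r := r) (k := k) (s := 1) h0 hH
    have h2 : r + k * H + 1 = r + (k * H + 1) := by omega
    rw [h2, h1]; simp
  · have hH1 : H = 1 := by omega
    subst hH1
    have h1 := cnt_formula (r := r) (k := k + 1) (s := 0) h0 h0
    simpa using h1

lemma cnt_succ_ne {H r b : Nat} (h0 : 0 < H) (hrH : r < H) (hne : b % H ≠ r) :
    cnt (b + 1) H r = cnt b H r := by
  rcases Nat.lt_or_ge b r with hbr | hbr
  · rw [cnt_stop (by omega), cnt_stop (by omega)]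
  · obtain ⟨k, s, hs, hb⟩ := cnt_decomp (n := b) h0 hbr
    have hs0 : s ≠ 0 := by
      intro h; subst h
      rw [Nat.add_zero] at hb
      exact hne (hb ▸ stride_mod h0 hrH)
    rcases Nat.lt_or_ge (s + 1) H with hs1 | hs1
    · have h1 : b + 1 = r + (k * H + (s + 1)) := by omega
      rw [h1, hb, cnt_formula h0 hs, cnt_formula h0 hs1]
      simp [hs0]
    · have hsH : s + 1 = H := by omega
      have h1 : b + 1 = r + ((k + 1) * H + 0) := by
        have : (k + 1) * H = k * H + H := by ring
        omega
      rw [h1, hb, cnt_formula h0 h0, cnt_formula h0 hs]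
      simp [hs0]

-- A's whole pass: every strided class below the bound N ends up a sorted
-- permutation of what it was in l0; everything from N on is untouched
lemma foldA_inv {H : Nat} (h0 : 0 < H) (l0 : List Int) (N : Nat) (hN : N ≤ l0.length) :
    ∀ (d b : Nat) (cur : List Int), N - b ≤ d → H ≤ b → b ≤ N →
    cur.length = l0.length →
    (∀ q : Nat, q < l0.length → b ≤ q → cur.getD q 0 = l0.getD q 0) →
    (∀ r : Nat, r < H → (cls cur b H r).Pairwise (· ≤ ·) ∧ (cls cur b H r).Perm (cls l0 b H r)) →
    ∃ fin, (PySem.List.pyRange (b : Int) (N : Int) 1).foldl (aStep (H : Int)) cur = fin ∧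
      fin.length = l0.length ∧
      (∀ q : Nat, q < l0.length → N ≤ q → fin.getD q 0 = l0.getD q 0) ∧
      (∀ r : Nat, r < H → (cls fin N H r).Pairwise (· ≤ ·) ∧ (cls fin N H r).Perm (cls l0 N H r)) := by
  intro d
  induction d with
  | zero =>
    intro b cur hd hHb hbN hlen huntouched hcls
    have hbeq : b = N := by omega
    subst hbeq
    rw [PySem.List.pyRange_one_eq_nil (by omega), List.foldl_nil]
    exact ⟨cur, rfl, hlen, fun q hq hbq => huntouched q hq hbq, hcls⟩
  | succ d ih =>
    intro b cur hd hHb hbN hlen huntouched hcls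
    rcases Nat.eq_or_lt_of_le hbN with hbeq | hblt
    · subst hbeq
      rw [PySem.List.pyRange_one_eq_nil (by omega), List.foldl_nil]
      exact ⟨cur, rfl, hlen, fun q hq hbq => huntouched q hq hbq, hcls⟩
    · set r := b % H with hrdef
      set k := b / H with hkdef
      have hrk : r + k * H = b := Nat.mod_add_div' b H
      have hr : r < H := Nat.mod_lt _ h0
      have hk : 1 ≤ k := by
        rw [hkdef]; exact (Nat.one_le_div_iff h0).mpr hHb
      have hlenb : r + k * H < cur.length := by rw [hrk]; omega
      have hcntb : cnt b H r = k := by rw [← hrk]; exact cnt_rk h0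
      have hsorted : ((List.range k).map (fun u => cur.getD (r + u * H) 0)).Pairwise (· ≤ ·) := by
        have := (hcls r hr).1
        rw [cls, hcntb] at this
        exact this
      obtain ⟨l2, hstep, hlen2, hunt2, hsort2, hperm2⟩ := stepA_spec h0 hr hk hlenb hsorted
      -- peel one index off the range and fold on
      have hrange : PySem.List.pyRange (b : Int) (N : Int) 1
          = (b : Int) :: PySem.List.pyRange ((b + 1 : Nat) : Int) (N : Int) 1 := by
        rw [PySem.List.pyRange_one_cons (by exact_mod_cast hblt)]
        push_cast; rfl
      rw [hrange, List.foldl_cons]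
      have hstep' : aStep (H : Int) cur (b : Int) = l2 := by rw [← hstep, ← hrk]
      rw [hstep']
      -- re-establish the invariant at bound b+1
      have hpivo : cur.getD (r + k * H) 0 = l0.getD b 0 := by
        rw [hrk]; exact huntouched b (by omega) (le_refl b)
      apply ih (b + 1) l2 (by omega) (by omega) (by omega) (by omega)
      · intro q hq hbq
        rw [hunt2 q (by omega) (Or.inr (by omega))]
        exact huntouched q hq (by omega)
      · intro r' hr'
        by_cases hrr : r' = r
        · rw [hrr]
          have hcnt1 : cnt (b + 1) H r = k + 1 := by rw [← hrk]; exact cnt_rk1 h0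
          constructor
          · rw [cls, hcnt1]; exact hsort2
          · rw [cls, hcnt1, cls, hcnt1]
            refine hperm2.trans ?_
            have hl0 : (List.range (k + 1)).map (fun u => l0.getD (r + u * H) 0)
                = (List.range k).map (fun u => l0.getD (r + u * H) 0) ++ [l0.getD (r + k * H) 0] := by
              rw [List.range_succ, List.map_append]; rfl
            rw [hl0]
            have hperm3 : ((List.range k).map (fun u => l0.getD (r + u * H) 0)
                ++ [l0.getD (r + k * H) 0]).Perm
                (l0.getD (r + k * H) 0 :: (List.range k).map (fun u => l0.getD (r + u * H) 0)) :=
              List.perm_append_singleton _ _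
            refine List.Perm.trans ?_ hperm3.symm
            have hcurcls := (hcls r hr).2
            rw [cls, hcntb, cls, hcntb] at hcurcls
            rw [hpivo]
            have hsame : l0.getD (r + k * H) 0 = l0.getD b 0 := by rw [hrk]
            rw [hsame]
            exact hcurcls.cons _
        · have hcnt1 : cnt (b + 1) H r' = cnt b H r' := cnt_succ_ne h0 hr' (by omega)
          have hclseq : cls l2 (b + 1) H r' = cls cur b H r' := by
            rw [cls, cls, hcnt1]
            apply List.map_congr_left
            intro u hu
            rw [List.mem_range] at hu
            have hq : r' + u * H < b := cnt_lt h0 hu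
            exact hunt2 _ (by omega) (Or.inl (by rw [stride_mod h0 hr']; omega))
          have hcls0 : cls l0 (b + 1) H r' = cls l0 b H r' := by rw [cls, cls, hcnt1]
          rw [hclseq, hcls0]
          exact hcls r' hr'


-- the body of B's outer for-loop, as a named function (definitionally the port's lambda)
def bStep (n h_ : Int) (cur : List Int) (r : Int) : List Int :=
  let idxs := pvCollect (n.toNat + 1) r n h_
  let vals := PySem.List.sorted (idxs.map (fun i => PySem.List.pyGetD cur i 0)) (fun x => x) false
  (idxs.zip vals).foldl (fun c iv => PySem.List.pySetD c iv.1 iv.2) cur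

lemma portB_eq_fold (l : List Int) (size h_ : Int) :
    adapted_insertion_sort_alt l size h_ =
      (PySem.List.pyRange 0 (min h_ (min size (l.length : Int))) 1).foldl
        (bStep (min size (l.length : Int)) h_) l := rfl

lemma pvCollect_eq {H : Nat} (h0 : 0 < H) :
    ∀ (fuel R N : Nat), cnt N H R ≤ fuel →
    pvCollect fuel (R : Int) (N : Int) (H : Int)
      = (List.range (cnt N H R)).map (fun u => ((R + u * H : Nat) : Int)) := by
  intro fuel
  induction fuel with
  | zero =>
    intro R N hf
    have h1 : cnt N H R = 0 := by omega
    rw [pvCollect, h1]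
    simp
  | succ f ih =>
    intro R N hf
    rw [pvCollect]
    by_cases hRN : R < N
    · have hcnt : cnt N H R = cnt N H (R + H) + 1 := by rw [cnt]; rw [dif_pos ⟨h0, hRN⟩]
      rw [if_pos (by exact_mod_cast hRN), hcnt]
      have harg : (R : Int) + (H : Int) = ((R + H : Nat) : Int) := by push_cast; ring
      rw [harg, ih (R + H) N (by omega)]
      rw [List.range_succ_eq_map]
      simp only [List.map_cons, List.map_map]
      congr 1
      · simp
      · apply List.map_congr_left
        intro u _
        simp only [Function.comp_apply, Nat.succ_eq_add_one]
        congr 1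
        ring
    · have hcnt : cnt N H R = 0 := by rw [cnt]; simp; omega
      rw [if_neg (by exact_mod_cast hRN), hcnt]
      simp

-- B's write-back loop: what it changes and what it leaves alone
def scat (c : List Nat) (vs : List Int) (cur : List Int) : List Int :=
  ((c.map (fun q : Nat => (q : Int))).zip vs).foldl (fun acc iv => PySem.List.pySetD acc iv.1 iv.2) cur

lemma scat_cons {a : Nat} {c : List Nat} {v : Int} {vs : List Int} {cur : List Int} :
    scat (a :: c) (v :: vs) cur = scat c vs (cur.set a v) := by
  unfold scat
  rw [List.map_cons, List.zip_cons_cons, List.foldl_cons, PySem.List.pySetD_natCast]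

lemma scat_length : ∀ (c : List Nat) (vs : List Int) (cur : List Int),
    (scat c vs cur).length = cur.length := by
  intro c
  induction c with
  | nil => intro vs cur; rfl
  | cons a c ih =>
    intro vs cur
    cases vs with
    | nil => rfl
    | cons v vs => rw [scat_cons, ih]; simp

lemma scat_unt : ∀ (c : List Nat) (vs : List Int) (cur : List Int) (q : Nat), q ∉ c →
    (scat c vs cur).getD q 0 = cur.getD q 0 := by
  intro c
  induction c with
  | nil => intro vs cur q _; rfl
  | cons a c ih =>
    intro vs cur q hq
    cases vs with
    | nil => rfl
    | cons v vs =>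
      rw [scat_cons, ih _ _ _ (fun hmem => hq (List.mem_cons_of_mem a hmem)),
        set_getD_ne (fun he => hq (by rw [← he]; exact List.mem_cons_self))]

lemma scat_gather : ∀ (c : List Nat) (vs : List Int) (cur : List Int),
    c.Nodup → vs.length = c.length → (∀ q ∈ c, q < cur.length) →
    c.map (fun q => (scat c vs cur).getD q 0) = vs := by
  intro c
  induction c with
  | nil =>
    intro vs cur _ hlen _
    simp [List.length_eq_zero_iff.mp (by simpa using hlen)]
  | cons a c ih =>
    intro vs cur hnodup hlen hbound
    cases vs with
    | nil => simp at hlen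
    | cons v vs =>
      have hnodup' := List.nodup_cons.mp hnodup
      rw [List.map_cons, scat_cons]
      congr 1
      · rw [scat_unt c vs _ a hnodup'.1, set_getD_self (hbound a List.mem_cons_self)]
      · exact ih vs (cur.set a v) hnodup'.2 (by simpa using hlen)
          (fun q hq => by rw [List.length_set]; exact hbound q (List.mem_cons_of_mem a hq))

-- B's whole pass, class by class
lemma foldB_inv {H N : Nat} (h0 : 0 < H) (l0 : List Int) (hN : N ≤ l0.length) :
    ∀ (d ρ : Nat) (cur : List Int), H - ρ ≤ d → ρ ≤ H →
    cur.length = l0.length →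
    (∀ q : Nat, q < l0.length → (N ≤ q ∨ ρ ≤ q % H) → cur.getD q 0 = l0.getD q 0) →
    (∀ r : Nat, r < ρ → cls cur N H r = PySem.List.sorted (cls l0 N H r) (fun x => x) false) →
    ∃ fin, (PySem.List.pyRange (ρ : Int) (H : Int) 1).foldl (bStep (N : Int) (H : Int)) cur = fin ∧
      fin.length = l0.length ∧
      (∀ q : Nat, q < l0.length → N ≤ q → fin.getD q 0 = l0.getD q 0) ∧
      (∀ r : Nat, r < H → cls fin N H r = PySem.List.sorted (cls l0 N H r) (fun x => x) false) := by
  intro d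
  induction d with
  | zero =>
    intro ρ cur hd hρH hlen hunt hcls
    have hρ : ρ = H := by omega
    subst hρ
    rw [PySem.List.pyRange_one_eq_nil (by omega), List.foldl_nil]
    exact ⟨cur, rfl, hlen, fun q hq hNq => hunt q hq (Or.inl hNq), hcls⟩
  | succ d ih =>
    intro ρ cur hd hρH hlen hunt hcls
    rcases Nat.eq_or_lt_of_le hρH with hρ | hρ
    · subst hρ
      rw [PySem.List.pyRange_one_eq_nil (by omega), List.foldl_nil]
      exact ⟨cur, rfl, hlen, fun q hq hNq => hunt q hq (Or.inl hNq), hcls⟩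
    · have hrange : PySem.List.pyRange (ρ : Int) (H : Int) 1
          = (ρ : Int) :: PySem.List.pyRange ((ρ + 1 : Nat) : Int) (H : Int) 1 := by
        rw [PySem.List.pyRange_one_cons (by exact_mod_cast hρ)]
        push_cast; rfl
      rw [hrange, List.foldl_cons]
      set K := cnt N H ρ with hK
      set c := (List.range K).map (fun u => ρ + u * H) with hc
      have hcmem : ∀ q ∈ c, q % H = ρ ∧ q < N := by
        intro q hq
        obtain ⟨u, hu, hqe⟩ := List.mem_map.mp hq
        rw [List.mem_range] at hu
        exact ⟨hqe ▸ stride_mod h0 hρ, hqe ▸ cnt_lt h0 hu⟩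
      have hstep : bStep (N : Int) (H : Int) cur (ρ : Int)
          = scat c (PySem.List.sorted (cls l0 N H ρ) (fun x => x) false) cur := by
        unfold bStep
        have hidx : pvCollect (((N : Int)).toNat + 1) (ρ : Int) (N : Int) (H : Int)
            = c.map (fun q : Nat => (q : Int)) := by
          rw [show ((N : Int)).toNat = N by simp]
          rw [pvCollect_eq h0 (N + 1) ρ N (by have := cnt_le (n := N) (r := ρ) h0; omega)]
          rw [hc, List.map_map]
          rfl
        rw [hidx]
        dsimp only
        have hvals : (c.map (fun q : Nat => (q : Int))).map (fun i => PySem.List.pyGetD cur i 0)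
            = cls l0 N H ρ := by
          rw [List.map_map, cls, hc, List.map_map]
          apply List.map_congr_left
          intro u hu
          rw [List.mem_range] at hu
          simp only [Function.comp_apply, PySem.List.pyGetD_natCast]
          exact hunt (ρ + u * H) (by have := cnt_lt h0 hu; omega)
            (Or.inr (by rw [stride_mod h0 hρ]))
        rw [hvals]
        rfl
      rw [hstep]
      have hnodup : c.Nodup := by
        rw [hc]
        refine List.Nodup.map ?_ (List.nodup_range)
        intro u w huw
        simp only at huw
        exact Nat.eq_of_mul_eq_mul_right h0 (by omega)
      have hclen : (PySem.List.sorted (cls l0 N H ρ) (fun x => x) false).length = c.length := by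
        rw [PySem.List.length_sorted, cls, hc]
        simp [hK]
      have hbound : ∀ q ∈ c, q < cur.length := by
        intro q hq
        have := (hcmem q hq).2
        omega
      apply ih (ρ + 1) _ (by omega) (by omega) (by rw [scat_length]; omega)
      · intro q hq hcase
        rw [scat_unt c _ cur q ?_]
        · exact hunt q hq (by rcases hcase with h | h; exact Or.inl h; exact Or.inr (by omega))
        · intro hmem
          obtain ⟨hqm, hqN⟩ := hcmem q hmem
          rcases hcase with h | h
          · omega
          · omega
      · intro r hrρ
        rcases Nat.eq_or_lt_of_le (Nat.lt_succ_iff.mp hrρ) with hre | hrlt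
        · subst hre
          rw [cls]
          have hmm : (List.range (cnt N H r)).map
              (fun u => (scat c (PySem.List.sorted (cls l0 N H r) (fun x => x) false) cur).getD (r + u * H) 0)
              = c.map (fun q => (scat c (PySem.List.sorted (cls l0 N H r) (fun x => x) false) cur).getD q 0) := by
            rw [hc, List.map_map]
            rfl
          rw [hmm, scat_gather c _ cur hnodup hclen hbound]
        · have hclseq : cls (scat c (PySem.List.sorted (cls l0 N H ρ) (fun x => x) false) cur) N H r
              = cls cur N H r := by
            rw [cls, cls]
            apply List.map_congr_left
            intro u hu
            rw [List.mem_range] at hu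
            apply scat_unt
            intro hmem
            have h1 := (hcmem _ hmem).1
            rw [stride_mod h0 (by omega)] at h1
            omega
          rw [hclseq]
          exact hcls r hrlt

lemma foldl_fixed {α β : Type} (f : α → β → α) (xs : List β) (c : α)
    (h : ∀ x ∈ xs, f c x = c) : xs.foldl f c = c := by
  induction xs with
  | nil => rfl
  | cons a xs ih =>
    rw [List.foldl_cons, h a List.mem_cons_self]
    exact ih (fun x hx => h x (List.mem_cons_of_mem a hx))

lemma setD_getD_self {l : List Int} {i : Int} (h1 : 0 ≤ i) (h2 : i < (l.length : Int)) :
    PySem.List.pySetD l i (PySem.List.pyGetD l i 0) = l := by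
  have h3 := PySem.List.pyGetD_eq_getElem l (0 : Int) h1 h2
  rw [PySem.List.pySetD_of_nonneg l _ h1, h3]
  exact List.set_getElem_self _

-- gap 0: A's loop shifts nothing and rewrites each slot with its own value; B has no class to sort
lemma case_zero (l : List Int) (size : Int) (hsz : 0 < size → size ≤ (l.length : Int)) :
    adapted_insertion_sort l size 0 = l ∧ adapted_insertion_sort_alt l size 0 = l := by
  constructor
  · rw [portA_eq_fold]
    apply foldl_fixed
    intro i hi
    rw [PySem.List.mem_pyRange_one] at hi
    have hilen : i < (l.length : Int) := lt_of_lt_of_le hi.2 (hsz (by omega))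
    unfold aStep
    dsimp only
    obtain ⟨m, hm⟩ : ∃ m, i.toNat + 1 = m + 1 := ⟨i.toNat, rfl⟩
    rw [hm, pvWhileA, if_neg (by intro ⟨_, hcc⟩; rw [sub_zero] at hcc; exact lt_irrefl _ hcc)]
    rw [sub_zero, add_zero]
    exact setD_getD_self hi.1 hilen
  · rw [portB_eq_fold]
    rw [PySem.List.pyRange_one_eq_nil (min_le_left 0 _), List.foldl_nil]

-- size ≤ gap: A's range is empty; B's classes below size are singletons, rewritten in place
lemma case_small (l : List Int) (size h_ : Int) (h1 : 1 ≤ h_) (hsz : size ≤ h_) :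
    adapted_insertion_sort l size h_ = l ∧ adapted_insertion_sort_alt l size h_ = l := by
  constructor
  · rw [portA_eq_fold, PySem.List.pyRange_one_eq_nil hsz, List.foldl_nil]
  · rw [portB_eq_fold]
    set n := min size (l.length : Int) with hn
    have hnh : min h_ n = n := min_eq_right (le_trans (min_le_left _ _) hsz)
    rw [hnh]
    apply foldl_fixed
    intro ρ hρ
    rw [PySem.List.mem_pyRange_one] at hρ
    have hnlen : n ≤ (l.length : Int) := min_le_right _ _
    unfold bStep
    dsimp only
    have hfuel : ∃ m, n.toNat + 1 = (m + 1) + 1 := ⟨n.toNat - 1, by omega⟩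
    obtain ⟨m, hm⟩ := hfuel
    rw [hm, pvCollect, if_pos hρ.2, pvCollect,
      if_neg (by push_cast; omega)]
    have hsing : ∀ v : Int, PySem.List.sorted [v] (fun x : Int => x) false = [v] := by
      intro v
      exact PySem.List.sorted_eq_self_of_pairwise _ _ (List.pairwise_singleton _ _)
    rw [List.map_cons, List.map_nil, hsing, List.zip_cons_cons, List.zip_nil_right,
      List.foldl_cons, List.foldl_nil]
    exact setD_getD_self hρ.1 (lt_of_lt_of_le hρ.2 hnlen)

-- ===== VERDICT =====
theorem adapted_insertion_sort_spec : Claim_equal_adapted_insertion_sort := by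
  intro l size h_ _hdom hpre
  obtain ⟨hh0, himp⟩ := hpre
  unfold Spec_adapted_insertion_sort
  set H := h_.toNat with hHdef
  have hh : h_ = (H : Int) := (Int.toNat_of_nonneg hh0).symm
  by_cases hH0 : H = 0
  · have hz : h_ = 0 := by omega
    subst hz
    have h := case_zero l size (fun hs => himp (by omega))
    rw [h.1, h.2]
  · have h0 : 0 < H := by omega
    by_cases hsz : size ≤ h_
    · have h := case_small l size h_ (by omega) hsz
      rw [h.1, h.2]
    · push_neg at hsz
      have hsizelen : size ≤ (l.length : Int) := himp hsz
      set N := size.toNat with hNdef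
      have hsN : size = (N : Int) := (Int.toNat_of_nonneg (by omega)).symm
      have hHN : H < N := by omega
      have hN : N ≤ l.length := by exact_mod_cast hsN ▸ hsizelen
      -- A's characterisation
      have hinit_cls : ∀ r : Nat, r < H →
          (cls l H H r).Pairwise (· ≤ ·) ∧ (cls l H H r).Perm (cls l H H r) := by
        intro r hr
        have hcnt : cnt H H r = 1 := by
          rw [cnt, dif_pos ⟨h0, hr⟩, cnt_stop (by omega)]
        refine ⟨?_, List.Perm.refl _⟩
        rw [cls, hcnt, List.range_one, List.map_cons, List.map_nil]
        exact List.pairwise_singleton _ _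
      obtain ⟨finA, hAeq, hAlen, hAunt, hAcls⟩ :=
        foldA_inv h0 l N hN (N - H) H l (by omega) (le_refl H) (by omega) rfl
          (fun q _ _ => rfl) hinit_cls
      have hA : adapted_insertion_sort l size h_ = finA := by
        rw [portA_eq_fold, hh, hsN, ← hAeq]
      -- B's characterisation
      obtain ⟨finB, hBeq, hBlen, hBunt, hBcls⟩ :=
        foldB_inv h0 l hN H 0 l (by omega) (by omega) rfl (fun q _ _ => rfl) (by omega)
      have hB : adapted_insertion_sort_alt l size h_ = finB := by
        rw [portB_eq_fold, hh, hsN, ← hBeq]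
        have hmin1 : min ((N : Int)) (l.length : Int) = (N : Int) := by
          rw [min_eq_left]; exact_mod_cast hN
        rw [hmin1]
        have hmin2 : min ((H : Int)) ((N : Int)) = (H : Int) := by
          rw [min_eq_left]; exact_mod_cast le_of_lt hHN
        rw [hmin2]
        norm_num
      rw [hA, hB]
      -- the two characterisations force equality
      have hclseq : ∀ r : Nat, r < H → cls finA N H r = cls finB N H r := by
        intro r hr
        have hBs := hBcls r hr
        have hperm : (cls finA N H r).Perm (cls finB N H r) := by
          refine (hAcls r hr).2.trans ?_
          rw [hBs]
          exact (PySem.List.sorted_perm _ _ _).symm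
        refine PySem.List.eq_of_perm_of_pairwise_le hperm (hAcls r hr).1 ?_
        rw [hBs]
        simpa using PySem.List.sorted_pairwise (cls l N H r) (fun x : Int => x)
      apply List.ext_getElem (by omega)
      intro j hj1 hj2
      have hgd : finA.getD j 0 = finB.getD j 0 := by
        by_cases hjN : j < N
        · set r := j % H with hrdef
          set u := j / H with hudef
          have hru : r + u * H = j := Nat.mod_add_div' j H
          have hrH : r < H := Nat.mod_lt _ h0
          have hu : u < cnt N H r := cnt_gt h0 (by omega)
          have hgetA : (cls finA N H r).getD u 0 = finA.getD (r + u * H) 0 := by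
            rw [cls, List.getD_eq_getElem _ _ (by simpa using hu), List.getElem_map,
              List.getElem_range]
          have hgetB : (cls finB N H r).getD u 0 = finB.getD (r + u * H) 0 := by
            rw [cls, List.getD_eq_getElem _ _ (by simpa using hu), List.getElem_map,
              List.getElem_range]
          rw [← hru, ← hgetA, ← hgetB, hclseq r hrH]
        · rw [hAunt j (by omega) (by omega), hBunt j (by omega) (by omega)]
      rw [List.getD_eq_getElem _ _ (by omega), List.getD_eq_getElem _ _ (by omega)] at hgd
      exact hgd
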